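-- pv_equiv track=rewrite | github.com/Siluryan/Personal-DevOps-Trainer | pdt/apps/core/templatetags/pdt_extras.py | _find_outside_parens
-- ===== SOURCE A (Python) =====
-- def _find_outside_parens(text: str, needle: str) -> int:
--     """Posição da primeira ocorrência de `needle` fora de parênteses, ou -1.
--
--     Evita cortar dentro de listas como «(Okta, Auth0)», o que deixaria parênteses
--     abertos no texto exibido na prova.
--     """
--     depth = 0
--     n = len(needle)
--     for i, ch in enumerate(text):
--         if ch == "(":
--             depth += 1
--         elif ch == ")" and depth > 0:
--             depth -= 1
--         elif depth == 0 and text.startswith(needle, i):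
--             return i
--     return -1
-- ===== SOURCE B (Python) =====
-- def _find_outside_parens(text: str, needle: str) -> int:
--     """Position of the first occurrence of `needle` outside parentheses, or -1.
--
--     Two phases: one pass precomputes the paren-depth before each character,
--     then str.find jumps from match to match until one lies at depth 0.
--     """
--     depth = 0
--     depths = []
--     for ch in text:
--         depths.append(depth)
--         if ch == "(":
--             depth += 1
--         elif ch == ")" and depth > 0:
--             depth -= 1
--     pos = text.find(needle)
--     while pos != -1:
--         if depths[pos] == 0:
--             return pos
--         pos = text.find(needle, pos + 1)
--     return -1
-- ===== Notes on version B (the rewrite author's own statement) =====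
-- stated objective: faster
-- what changed: Instead of testing startswith at every character while tracking depth in one fused scan, B precomputes the paren-depth prefix in one pass and then lets str.find jump from occurrence to occurrence, returning the first one at depth 0; Pre_ excludes the empty needle, a defensible corner (Python finds '' everywhere and A's choice of which depth-0 index counts is anybody's; B raises IndexError on empty text).
-- intended difference: When the needle starts with '(' and occurs at paren-depth 0, A returns -1 because its elif chain increments depth at '(' before ever testing the match, while B returns that first depth-0 position, which is the intended 'first occurrence outside parentheses'. — e.g. on _find_outside_parens("(a)", "(a"): A returns -1, B returns 0
-- outside the precondition, e.g. on _find_outside_parens('(a)b', ''): A returns 3, B returns 0; on _find_outside_parens('', ''): A returns -1, B raises IndexError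
import Mathlib
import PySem

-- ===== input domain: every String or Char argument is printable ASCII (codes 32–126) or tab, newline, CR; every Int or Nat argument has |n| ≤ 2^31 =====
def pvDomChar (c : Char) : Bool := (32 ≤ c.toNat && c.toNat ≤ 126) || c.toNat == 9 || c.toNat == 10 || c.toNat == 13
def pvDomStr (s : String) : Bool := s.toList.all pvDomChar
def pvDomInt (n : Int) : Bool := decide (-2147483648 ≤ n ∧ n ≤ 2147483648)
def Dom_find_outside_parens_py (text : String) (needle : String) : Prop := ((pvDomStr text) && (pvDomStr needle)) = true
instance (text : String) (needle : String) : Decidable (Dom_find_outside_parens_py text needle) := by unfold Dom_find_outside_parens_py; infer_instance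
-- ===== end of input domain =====

-- B replaces A's fused scan (startswith tested at every index while tracking depth) by a
-- depth-prefix pass plus str.find jumping from occurrence to occurrence; A and B differ
-- (D_ below) exactly where the needle starts with '(' and occurs at depth 0.

-- ===== PORT A =====
-- the enumerate loop, as structural recursion over the remaining suffix with the index i
-- carried along; text.startswith(needle, i) with 0 ≤ i < len(text) is exactly
-- PySem.Chars.startswith applied to the current suffix (text[i:]), so this is exact.
def pvALoop (nd : List Char) : List Char → Int → Int → Int
  | [], _, _ => -1
  | c :: rest, i, depth =>
    if c = '(' then pvALoop nd rest (i+1) (depth+1)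
    else if c = ')' ∧ depth > 0 then pvALoop nd rest (i+1) (depth-1)
    else if depth = 0 ∧ PySem.Chars.startswith (c :: rest) nd then i
    else pvALoop nd rest (i+1) depth

def find_outside_parens_py (text : String) (needle : String) : Int :=
  pvALoop needle.toList text.toList 0 0

-- ===== PORT B =====
-- first loop of Source B: build the depths list (append before branching, as in the Python)
def pvBDepths : List Char → List Int → Int → List Int
  | [], ds, _ => ds
  | c :: rest, ds, depth =>
    let ds' := ds ++ [depth]
    if c = '(' then pvBDepths rest ds' (depth+1)
    else if c = ')' ∧ depth > 0 then pvBDepths rest ds' (depth-1)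
    else pvBDepths rest ds' depth

-- the while loop of Source B; the fuel argument is a totality guard only (each iteration moves
-- pos strictly right or to -1, so len(text)+2 iterations always suffice); depths[pos] is in
-- range whenever Python reads it inside Pre_ (nonempty needle, pos a match position).
def pvBLoop (t nd : List Char) (ds : List Int) : Nat → Int → Int
  | 0, _ => -1
  | fuel+1, pos =>
    if pos = -1 then -1
    else if PySem.List.pyGetD ds pos 0 = 0 then pos
    else pvBLoop t nd ds fuel (PySem.Chars.findFrom t nd (pos+1) none)

def find_outside_parens_py_alt (text : String) (needle : String) : Int :=
  let t := text.toList
  let nd := needle.toList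
  pvBLoop t nd (pvBDepths t [] 0) (t.length + 2) (PySem.Chars.find t nd)

-- ===== PRECONDITION & SPEC =====
-- Pre_ excludes the empty needle, a defensible corner: Python matches '' at every index, so
-- which depth-0 index (or -1) A returns is an artefact of its scan, and B raises IndexError
-- on empty text there.
def Pre_find_outside_parens_py (text : String) (needle : String) : Prop := needle ≠ ""
instance (text : String) (needle : String) : Decidable (Pre_find_outside_parens_py text needle) := by unfold Pre_find_outside_parens_py; infer_instance

def pvWitness_find_outside_parens_py : String × String := ("a(b)c", "b")

-- When the needle starts with '(' and occurs at paren-depth 0, A returns -1 (its elif chain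
-- increments depth at '(' before ever testing the match) while B returns that first depth-0
-- position, which is the intended "first occurrence outside parentheses".
def D_find_outside_parens_py (text : String) (needle : String) : Prop :=
  needle.toList.head? = some '(' ∧
  ∃ i < text.toList.length,
    (text.toList.take i).foldl (fun d c => if c = '(' then d + 1 else d - if c = ')' then 1 else 0) 0 = 0 ∧
    needle.toList <+: text.toList.drop i
instance (text : String) (needle : String) : Decidable (D_find_outside_parens_py text needle) := by unfold D_find_outside_parens_py; infer_instance

def Spec_find_outside_parens_py (text : String) (needle : String) (out : Int) : Prop := ¬ D_find_outside_parens_py text needle → out = find_outside_parens_py_alt text needle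
instance (text : String) (needle : String) (out : Int) : Decidable (Spec_find_outside_parens_py text needle out) := by unfold Spec_find_outside_parens_py; infer_instance

def pvDiffWitness_find_outside_parens_py : String × String := ("(a)", "(a")
def pvDiffWitnessOut_find_outside_parens_py : Int × Int := (-1, 0)

-- ===== CLAIM (what is proved, stated in full; the proofs are below) =====
def Claim_unchanged_find_outside_parens_py : Prop := ∀ (text : String) (needle : String), Dom_find_outside_parens_py text needle → Pre_find_outside_parens_py text needle → Spec_find_outside_parens_py text needle (find_outside_parens_py text needle)
def Claim_changed_find_outside_parens_py : Prop := Dom_find_outside_parens_py (pvDiffWitness_find_outside_parens_py.1) (pvDiffWitness_find_outside_parens_py.2) ∧ Pre_find_outside_parens_py (pvDiffWitness_find_outside_parens_py.1) (pvDiffWitness_find_outside_parens_py.2) ∧ D_find_outside_parens_py (pvDiffWitness_find_outside_parens_py.1) (pvDiffWitness_find_outside_parens_py.2) ∧ find_outside_parens_py (pvDiffWitness_find_outside_parens_py.1) (pvDiffWitness_find_outside_parens_py.2) = pvDiffWitnessOut_find_outside_parens_py.1 ∧ find_outside_parens_py_alt (pvDiffWitness_find_outside_parens_py.1) (pvDiffWitness_find_outside_parens_py.2)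 = pvDiffWitnessOut_find_outside_parens_py.2 ∧ pvDiffWitnessOut_find_outside_parens_py.1 ≠ pvDiffWitnessOut_find_outside_parens_py.2
def Claim_exact_find_outside_parens_py : Prop := ∀ (text : String) (needle : String), Dom_find_outside_parens_py text needle → Pre_find_outside_parens_py text needle → D_find_outside_parens_py text needle → find_outside_parens_py text needle ≠ find_outside_parens_py_alt text needle

-- ===== LEMMAS AND PROOFS =====

-- depth update for one character (the shared branch structure of the two ports)
def pvStep (c : Char) (d : Int) : Int :=
  if c = '(' then d + 1 else if c = ')' ∧ d > 0 then d - 1 else d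

-- the depths list, accumulator-free
def pvMkds : List Char → Int → List Int
  | [], _ => []
  | c :: rest, d => d :: pvMkds rest (pvStep c d)

-- hit predicates: A additionally requires the character not to be '(' (its elif chain)
def pvGoodA (t nd : List Char) (k : Nat) : Bool :=
  ((pvMkds t 0).getD k 0 == 0) && (t.getD k ' ' != '(') && nd.isPrefixOf (t.drop k)
def pvGoodB (t nd : List Char) (k : Nat) : Bool :=
  ((pvMkds t 0).getD k 0 == 0) && nd.isPrefixOf (t.drop k)

-- reference: first index j with k ≤ j < n and g j, else -1
def pvSearch (g : Nat → Bool) (n : Nat) (k : Nat) : Int :=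
  if _h : k < n then
    if g k then (k : Int) else pvSearch g n (k+1)
  else -1
termination_by n - k

theorem pvBDepths_eq (s : List Char) : ∀ (acc : List Int) (d : Int),
    pvBDepths s acc d = acc ++ pvMkds s d := by
  induction s with
  | nil => intro acc d; simp [pvBDepths, pvMkds]
  | cons c rest ih =>
    intro acc d
    simp only [pvBDepths, pvMkds, pvStep]
    split_ifs with h1 h2 <;> rw [ih] <;> simp

theorem pvMkds_getD_zero (s : List Char) (d : Int) (h : s ≠ []) :
    (pvMkds s d).getD 0 0 = d := by
  cases s with
  | nil => exact absurd rfl h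
  | cons c rest => simp [pvMkds]

theorem pvMkds_getD_succ (s : List Char) : ∀ (d : Int) (k : Nat), k + 1 < s.length →
    (pvMkds s d).getD (k+1) 0 = pvStep (s.getD k ' ') ((pvMkds s d).getD k 0) := by
  induction s with
  | nil => intro d k h; simp at h
  | cons c rest ih =>
    intro d k h
    cases k with
    | zero =>
      have hrest : rest ≠ [] := by
        simp at h; intro he; simp [he] at h
      have h0 := pvMkds_getD_zero rest (pvStep c d) hrest
      simp only [List.getD] at h0 ⊢
      simp [pvMkds, h0]
    | succ k =>
      simp only [List.length_cons] at h
      simp only [pvMkds, List.getD_cons_succ]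
      exact ih (pvStep c d) k (by omega)

-- the depth D_ speaks about is the depths-list entry
theorem pvMkds_getD_eq_foldl (s : List Char) : ∀ (d : Int) (k : Nat), k < s.length →
    (pvMkds s d).getD k 0 = (s.take k).foldl (fun d c => pvStep c d) d := by
  induction s with
  | nil => intro d k h; simp at h
  | cons c rest ih =>
    intro d k h
    cases k with
    | zero => simp [pvMkds]
    | succ k =>
      simp only [pvMkds, List.getD_cons_succ, List.take_succ_cons, List.foldl_cons]
      exact ih (pvStep c d) k (by simpa using h)

-- the clamped Nat fold D_ speaks about is the Int depth of the ports
theorem pvFold_cast (l : List Char) : ∀ n : Nat,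
    l.foldl (fun d c => pvStep c d) (n : Int) =
      ((l.foldl (fun d c => if c = '(' then d + 1 else d - if c = ')' then 1 else 0) n : Nat) : Int) := by
  induction l with
  | nil => intro n; simp
  | cons c rest ih =>
    intro n
    simp only [List.foldl_cons]
    have hstep : pvStep c (n : Int) =
        (((if c = '(' then n + 1 else n - if c = ')' then 1 else 0) : Nat) : Int) := by
      unfold pvStep
      by_cases h1 : c = '(' <;> by_cases h2 : c = ')' <;> simp [h1, h2] <;> omega
    rw [hstep]
    exact ih _

theorem pvDepth0_iff (t : List Char) (i : Nat) (hi : i < t.length) :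
    (pvMkds t 0).getD i 0 = 0 ↔
      (t.take i).foldl (fun d c => if c = '(' then d + 1 else d - if c = ')' then 1 else 0) 0 = 0 := by
  rw [pvMkds_getD_eq_foldl t 0 i hi]
  have h := pvFold_cast (t.take i) 0
  rw [show ((0 : Nat) : Int) = 0 from rfl] at h
  rw [h]
  exact ⟨fun hz => by exact_mod_cast hz, fun hz => by exact_mod_cast hz⟩

theorem pvA_eq_search (t nd : List Char) : ∀ (n k : Nat), t.length - k ≤ n → k ≤ t.length →
    pvALoop nd (t.drop k) (k : Int) ((pvMkds t 0).getD k 0) = pvSearch (pvGoodA t nd) t.length k := by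
  intro n
  induction n with
  | zero =>
    intro k h1 h2
    have hk : k = t.length := by omega
    subst hk
    rw [List.drop_length, pvSearch]
    simp [pvALoop]
  | succ n ih =>
    intro k h1 h2
    by_cases hk : k < t.length
    · have hdrop : t.drop k = t[k] :: t.drop (k+1) := List.drop_eq_getElem_cons hk
      set c := t[k] with hc
      set d := (pvMkds t 0).getD k 0 with hd
      have hrec : ∀ d' : Int, (k + 1 < t.length → (pvMkds t 0).getD (k+1) 0 = d') →
          pvALoop nd (t.drop (k+1)) ((k:Int)+1) d' = pvSearch (pvGoodA t nd) t.length (k+1) := by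
        intro d' hd'
        by_cases hk1 : k + 1 < t.length
        · have hih := ih (k+1) (by omega) (by omega)
          rw [hd' hk1] at hih
          have hcast : ((k:Int)+1) = ((k+1 : Nat) : Int) := by push_cast; ring
          rw [hcast]; exact hih
        · have hnil : t.drop (k+1) = [] := List.drop_eq_nil_of_le (by omega)
          rw [hnil, pvSearch]
          simp [pvALoop, hk1]
      have hgetD : t.getD k ' ' = c := List.getD_eq_getElem t ' ' hk
      have hgetE : t[k]?.getD ' ' = c := by rw [← List.getD_eq_getElem?_getD]; exact hgetD
      have hdE : (pvMkds t 0)[k]?.getD 0 = d := by rw [← List.getD_eq_getElem?_getD, hd]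
      rw [hdrop]
      simp only [pvALoop]
      rw [pvSearch, dif_pos hk]
      by_cases h1c : c = '('
      · rw [if_pos h1c]
        have hgood : pvGoodA t nd k = false := by
          have h' : t[k]?.getD ' ' = '(' := by rw [hgetE, h1c]
          simp [pvGoodA, h']
        rw [if_neg (by simp [hgood])]
        exact hrec (d+1) (fun hlt => by
          rw [pvMkds_getD_succ t 0 k hlt, hgetD, ← hd]; simp [pvStep, h1c])
      · rw [if_neg h1c]
        by_cases h2c : c = ')' ∧ d > 0
        · rw [if_pos h2c]
          have hdne : d ≠ 0 := by have := h2c.2; omega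
          have hgood : pvGoodA t nd k = false := by simp [pvGoodA, hdE, hdne]
          rw [if_neg (by simp [hgood])]
          exact hrec (d-1) (fun hlt => by
            rw [pvMkds_getD_succ t 0 k hlt, hgetD, ← hd]
            simp [pvStep, h2c.1, h2c.2])
        · rw [if_neg h2c]
          by_cases h3c : d = 0 ∧ PySem.Chars.startswith (c :: t.drop (k+1)) nd
          · rw [if_pos h3c]
            have hgood : pvGoodA t nd k = true := by
              have hsw := h3c.2
              simp only [PySem.Chars.startswith] at hsw
              simp [pvGoodA, hgetE, hdE, h3c.1, h1c, hdrop, hsw]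
            rw [if_pos hgood]
          · rw [if_neg h3c]
            have hgood : pvGoodA t nd k = false := by
              by_cases hdz : d = 0
              · have hnsw : ¬ PySem.Chars.startswith (c :: t.drop (k+1)) nd = true := fun hsw => h3c ⟨hdz, hsw⟩
                simp only [PySem.Chars.startswith] at hnsw
                simp [pvGoodA, hdrop, hnsw]
              · simp [pvGoodA, hdE, hdz]
            rw [if_neg (by simp [hgood])]
            exact hrec d (fun hlt => by
              rw [pvMkds_getD_succ t 0 k hlt, hgetD, ← hd]
              simp [pvStep, h1c, h2c])
    · have hk' : k = t.length := by omega
      subst hk'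
      rw [List.drop_length, pvSearch]
      simp [pvALoop]

theorem pvSearch_skip (g : Nat → Bool) (n m : Nat) (hm : m ≤ n) :
    ∀ (fuel k : Nat), m - k ≤ fuel → k ≤ m → (∀ j, k ≤ j → j < m → g j = false) →
    pvSearch g n k = pvSearch g n m := by
  intro fuel
  induction fuel with
  | zero =>
    intro k h1 h2 _
    have hkm : k = m := by omega
    rw [hkm]
  | succ fuel ih =>
    intro k h1 h2 hall
    by_cases hk : k = m
    · rw [hk]
    · have hklt : k < m := by omega
      rw [pvSearch, dif_pos (by omega), if_neg (by simp [hall k le_rfl hklt])]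
      exact ih (k+1) (by omega) (by omega) (fun j hj1 hj2 => hall j (by omega) hj2)

theorem pvSearch_none (g : Nat → Bool) (n k : Nat) (hk : k ≤ n)
    (h : ∀ j, k ≤ j → j < n → g j = false) :
    pvSearch g n k = -1 := by
  rw [pvSearch_skip g n n le_rfl (n - k) k le_rfl hk h, pvSearch]
  simp

theorem pvSearch_congr (g g' : Nat → Bool) (n : Nat) :
    ∀ (fuel k : Nat), n - k ≤ fuel → (∀ j, k ≤ j → j < n → g j = g' j) →
    pvSearch g n k = pvSearch g' n k := by
  intro fuel
  induction fuel with
  | zero =>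
    intro k h1 _
    have hk : ¬ k < n := by omega
    conv_lhs => rw [pvSearch]
    conv_rhs => rw [pvSearch]
    simp [hk]
  | succ fuel ih =>
    intro k h1 hall
    conv_lhs => rw [pvSearch]
    conv_rhs => rw [pvSearch]
    by_cases hk : k < n
    · rw [dif_pos hk, dif_pos hk, hall k le_rfl hk]
      by_cases hg : g' k
      · rw [if_pos hg, if_pos hg]
      · rw [if_neg hg, if_neg hg]
        exact ih (k+1) (by omega) (fun j hj1 hj2 => hall j (by omega) hj2)
    · rw [dif_neg hk, dif_neg hk]

theorem pvSearch_ne_neg_one (g : Nat → Bool) (n : Nat) :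
    ∀ (fuel k j : Nat), n - k ≤ fuel → k ≤ j → j < n → g j = true →
    pvSearch g n k ≠ -1 := by
  intro fuel
  induction fuel with
  | zero => intro k j h1 h2 h3 _; omega
  | succ fuel ih =>
    intro k j h1 h2 h3 hg
    rw [pvSearch, dif_pos (by omega)]
    by_cases hgk : g k
    · rw [if_pos hgk]; omega
    · rw [if_neg hgk]
      have hkj : k ≠ j := fun he => by rw [he, hg] at hgk; exact hgk rfl
      exact ih (k+1) j (by omega) (by omega) h3 hg

theorem pvNoPrefix_of_noInfix (t nd : List Char) (k j : Nat) (hj : k ≤ j)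
    (hinf : ¬ nd <:+: t.drop k) : ¬ nd <+: t.drop j := by
  intro hpre
  apply hinf
  have hsuf : t.drop j <:+ t.drop k := by
    have hs := List.drop_suffix (j - k) (List.drop k t)
    rwa [List.drop_drop, Nat.add_sub_cancel' hj] at hs
  exact hpre.isInfix.trans hsuf.isInfix

theorem pvGoodB_false_of_no_prefix (t nd : List Char) (j : Nat) (h : ¬ nd <+: t.drop j) :
    pvGoodB t nd j = false := by
  have hb : nd.isPrefixOf (t.drop j) = false := by
    rw [← Bool.not_eq_true, List.isPrefixOf_iff_prefix]
    exact h
  simp [pvGoodB, hb]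

theorem pvB_eq_search (t nd : List Char) (hnd : nd ≠ []) : ∀ (fuel : Nat) (k : Nat), k ≤ t.length →
    t.length + 2 - k ≤ fuel →
    pvBLoop t nd (pvMkds t 0) fuel (PySem.Chars.findFrom t nd (k : Int) none) = pvSearch (pvGoodB t nd) t.length k := by
  intro fuel
  induction fuel with
  | zero => intro k hk hfuel; omega
  | succ fuel ih =>
    intro k hk hfuel
    by_cases hp : PySem.Chars.findFrom t nd (k : Int) none = -1
    · rw [hp]
      simp only [pvBLoop]
      have hnoinf := (PySem.Chars.findFrom_natCast_eq_neg_one_iff t nd k hk).mp hp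
      refine (pvSearch_none _ t.length k hk ?_).symm
      intro j hj1 _
      exact pvGoodB_false_of_no_prefix t nd j (pvNoPrefix_of_noInfix t nd k j hj1 hnoinf)
    · obtain ⟨hkle, hpre, hmin⟩ := PySem.Chars.findFrom_natCast_spec t nd k hk hp
      set p := PySem.Chars.findFrom t nd (k : Int) none with hpdef
      have hp0 : (0:Int) ≤ p := le_trans (by positivity) hkle
      set pn := p.toNat with hpn
      have hpcast : p = (pn : Int) := (Int.toNat_of_nonneg hp0).symm
      have hpnlt : pn < t.length := by
        have hne : t.drop pn ≠ [] := by
          intro he; rw [he] at hpre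
          exact hnd (List.prefix_nil.mp hpre)
        have := List.length_drop (l := t) (i := pn)
        by_contra hge
        have : t.drop pn = [] := List.drop_eq_nil_of_le (by omega)
        exact hne this
      have hkpn : k ≤ pn := by
        have h' := hkle; rw [hpcast] at h'; exact_mod_cast h'
      simp only [pvBLoop]
      rw [if_neg hp]
      by_cases hcond : (pvMkds t 0).getD pn 0 = 0
      · have hcond' : PySem.List.pyGetD (pvMkds t 0) p 0 = 0 := by
          rw [hpcast]
          simp only [PySem.List.pyGetD_natCast]
          simpa [List.getD] using hcond
        rw [if_pos hcond']
        have hgood : pvGoodB t nd pn = true := by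
          simp [pvGoodB, List.getD_eq_getElem?_getD] at hcond ⊢
          simp [hcond, hpre]
        rw [pvSearch_skip _ t.length pn (by omega) (pn - k) k le_rfl hkpn (fun j hj1 hj2 => by
              exact pvGoodB_false_of_no_prefix t nd j (hmin j hj1 hj2))]
        rw [pvSearch, dif_pos hpnlt, if_pos hgood, hpcast]
      · have hcond' : ¬ PySem.List.pyGetD (pvMkds t 0) p 0 = 0 := by
          rw [hpcast]
          simp only [PySem.List.pyGetD_natCast]
          intro hh
          exact hcond (by simpa [List.getD] using hh)
        rw [if_neg hcond']
        have hnext : p + 1 = ((pn + 1 : Nat) : Int) := by rw [hpcast]; push_cast; ring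
        rw [hnext, ih (pn+1) (by omega) (by omega)]
        have hgpn : pvGoodB t nd pn = false := by
          have hz' : ¬ (pvMkds t 0)[pn]?.getD 0 = 0 := by
            rw [← List.getD_eq_getElem?_getD]; exact hcond
          simp [pvGoodB, hz']
        have hall : ∀ j, k ≤ j → j < pn+1 → pvGoodB t nd j = false := by
          intro j hj1 hj2
          by_cases hje : j = pn
          · rw [hje]; exact hgpn
          · exact pvGoodB_false_of_no_prefix t nd j (hmin j hj1 (by omega))
        exact (pvSearch_skip _ t.length (pn+1) (by omega) (pn+1) k (by omega) (by omega) hall).symm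

-- both ports, as the reference search over their hit predicates
theorem pvA_char (text needle : String) :
    find_outside_parens_py text needle = pvSearch (pvGoodA text.toList needle.toList) text.toList.length 0 := by
  unfold find_outside_parens_py
  have hd0 : ((pvMkds text.toList 0)[0]?).getD 0 = 0 := by
    cases text.toList with
    | nil => simp [pvMkds]
    | cons c rest => simp [pvMkds]
  have := pvA_eq_search text.toList needle.toList text.toList.length 0 (by omega) (by omega)
  simpa [hd0] using this

theorem pvB_char (text needle : String) (hnd : needle.toList ≠ []) :
    find_outside_parens_py_alt text needle = pvSearch (pvGoodB text.toList needle.toList) text.toList.length 0 := by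
  unfold find_outside_parens_py_alt
  simp only
  rw [pvBDepths_eq text.toList [] 0, List.nil_append]
  have hf : PySem.Chars.find text.toList needle.toList = PySem.Chars.findFrom text.toList needle.toList ((0 : Nat) : Int) none := by
    simp [PySem.Chars.findFrom_zero]
  rw [hf]
  exact pvB_eq_search text.toList needle.toList hnd (text.toList.length + 2) 0 (by omega) (by omega)

-- with needle head '(' every A-hit is impossible
theorem pvGoodA_false_of_head (t nd : List Char) (hh : nd.head? = some '(')
    (j : Nat) : pvGoodA t nd j = false := by
  by_cases hp : nd <+: t.drop j
  · obtain ⟨c, rest, hnd⟩ : ∃ c rest, nd = c :: rest := by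
      cases nd with
      | nil => simp at hh
      | cons c rest => exact ⟨c, rest, rfl⟩
    have hc : c = '(' := by rw [hnd] at hh; simpa using hh
    obtain ⟨s, hs⟩ := hp
    have hdj : t.drop j = '(' :: (rest ++ s) := by rw [← hs, hnd, hc]; simp
    have hchar : t[j]?.getD ' ' = '(' := by
      have h0 : (t.drop j)[0]?.getD ' ' = '(' := by rw [hdj]; rfl
      rw [List.getElem?_drop] at h0
      simpa using h0
    simp [pvGoodA, hchar]
  · have hb : nd.isPrefixOf (t.drop j) = false := by
      rw [← Bool.not_eq_true, List.isPrefixOf_iff_prefix]; exact hp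
    simp [pvGoodA, hb]

-- ===== VERDICT (by name: the statement is the Claim_ definition above) =====
theorem find_outside_parens_py_spec : Claim_unchanged_find_outside_parens_py := by
  intro text needle _ hpre hnd
  have hne : needle.toList ≠ [] := by
    intro he
    exact hpre (String.toList_inj.mp (by simpa using he))
  rw [pvA_char, pvB_char text needle hne]
  set t := text.toList
  set nd := needle.toList
  obtain ⟨c, rest, hndc⟩ := List.exists_cons_of_ne_nil (by simpa using hne : nd ≠ [])
  by_cases hc : c = '('
  · -- needle starts with '(': A finds nothing, and ¬D says B finds nothing either
    have hh : nd.head? = some '(' := by rw [hndc, hc]; rfl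
    rw [pvSearch_none (pvGoodA t nd) t.length 0 (by omega)
        (fun j _ _ => pvGoodA_false_of_head t nd hh j)]
    rw [pvSearch_none (pvGoodB t nd) t.length 0 (by omega) ?_]
    intro j _ hj
    rw [← Bool.not_eq_true]
    intro hg
    apply hnd
    unfold D_find_outside_parens_py
    refine ⟨hh, ?_⟩
    simp only [pvGoodB, Bool.and_eq_true, beq_iff_eq, List.isPrefixOf_iff_prefix] at hg
    exact ⟨j, hj, (pvDepth0_iff t j hj).mp hg.1, hg.2⟩
  · -- needle does not start with '(': the two hit predicates agree
    apply pvSearch_congr _ _ t.length t.length 0 (by omega)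
    intro j _ hj
    by_cases hp : nd.isPrefixOf (t.drop j)
    · have hpp : nd <+: t.drop j := List.isPrefixOf_iff_prefix.mp hp
      obtain ⟨s, hs⟩ := hpp
      have hdj : t.drop j = c :: (rest ++ s) := by rw [← hs, hndc]; simp
      have hchar : t[j]?.getD ' ' = c := by
        have h0 : (t.drop j)[0]?.getD ' ' = c := by rw [hdj]; rfl
        rw [List.getElem?_drop] at h0
        simpa using h0
      simp [pvGoodA, pvGoodB, hchar, hc, hp]
    · simp [pvGoodA, pvGoodB, hp]

theorem find_outside_parens_py_changed : Claim_changed_find_outside_parens_py := by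
  unfold Claim_changed_find_outside_parens_py; decide

theorem find_outside_parens_py_tight : Claim_exact_find_outside_parens_py := by
  intro text needle _ hpre hD
  obtain ⟨hh, hex⟩ := hD
  have hne : needle.toList ≠ [] := by
    intro he; rw [he] at hh; simp at hh
  rw [pvA_char, pvB_char text needle hne]
  obtain ⟨j, hjlt, hdep, hpref⟩ := hex
  have hgB : pvGoodB text.toList needle.toList j = true := by
    simp only [pvGoodB, Bool.and_eq_true, beq_iff_eq, List.isPrefixOf_iff_prefix]
    exact ⟨(pvDepth0_iff text.toList j hjlt).mpr hdep, hpref⟩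
  rw [pvSearch_none (pvGoodA text.toList needle.toList) text.toList.length 0 (by omega)
      (fun k _ _ => pvGoodA_false_of_head text.toList needle.toList hh k)]
  exact fun he => pvSearch_ne_neg_one (pvGoodB text.toList needle.toList) text.toList.length
    text.toList.length 0 j (by omega) (by omega) hjlt hgB he.symm
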